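-- pv_equiv track=rewrite | github.com/raehik/pkg-install | pkg-install.py | process_gh_info
-- ===== SOURCE A (Python) =====
-- def process_gh_info(raw_info):
--     info = []
--
--     for i in range(0, len(raw_info), 3):
--         line_1 = raw_info[i]
--
--         try:
--             line_2 = raw_info[i+1]
--         except IndexError:
--             line_2 = ""
--
--         try:
--             line_3 = raw_info[i+2]
--         except IndexError:
--             line_3 = ""
--
--         info.append([line_1, line_2, line_3])
--
--     return info
-- ===== SOURCE B (Python) =====
-- import itertools
--
-- def process_gh_info(raw_info):
--     return [list(group)
--             for group in itertools.zip_longest(*[iter(raw_info)] * 3, fillvalue="")]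
-- ===== Notes on version B (the rewrite author's own statement) =====
-- stated objective: idiomatic
-- what changed: Replaces the index loop with try/except IndexError padding by the standard itertools grouper idiom (zip_longest over three copies of one shared iterator, fillvalue=""), eliminating all index arithmetic and exception handling.
import Mathlib
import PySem

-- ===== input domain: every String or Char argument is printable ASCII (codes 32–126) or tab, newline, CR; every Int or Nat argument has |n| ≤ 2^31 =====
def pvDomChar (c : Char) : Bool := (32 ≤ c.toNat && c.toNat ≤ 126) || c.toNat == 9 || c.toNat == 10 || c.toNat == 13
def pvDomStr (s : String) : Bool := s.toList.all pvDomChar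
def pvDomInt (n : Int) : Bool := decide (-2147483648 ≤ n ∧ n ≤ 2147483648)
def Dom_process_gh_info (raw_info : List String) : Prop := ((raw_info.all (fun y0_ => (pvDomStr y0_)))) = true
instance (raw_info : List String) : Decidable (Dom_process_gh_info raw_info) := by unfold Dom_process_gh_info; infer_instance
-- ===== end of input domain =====

-- B replaces A's index loop with try/except padding by the itertools grouper idiom
-- (zip_longest over three copies of one shared iterator, fillvalue=""): same cost, more idiomatic.


-- ===== PORT A =====
-- for i in range(0, len(raw_info), 3): append [raw_info[i], raw_info[i+1] or "", raw_info[i+2] or ""]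
-- raw_info[i] is always in range inside the loop; the try/except IndexError defaulting for
-- i+1 and i+2 is exactly pyGetD with default "".
def process_gh_info (raw_info : List String) : List (List String) :=
  (PySem.List.pyRange 0 (raw_info.length : Int) 3).foldl
    (fun info i =>
      info ++ [[PySem.List.pyGetD raw_info i "",
                PySem.List.pyGetD raw_info (i + 1) "",
                PySem.List.pyGetD raw_info (i + 2) ""]]) []

-- ===== PORT B =====
-- zip_longest(*[iter(raw_info)]*3, fillvalue=""): one shared iterator pulls three
-- consecutive elements per group, the last short group is padded with "".
def process_gh_info_alt (raw_info : List String) : List (List String) :=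
  match raw_info with
  | [] => []
  | [a] => [[a, "", ""]]
  | [a, b] => [[a, b, ""]]
  | a :: b :: c :: rest => [a, b, c] :: process_gh_info_alt rest

-- ===== PRECONDITION & SPEC =====
def Spec_process_gh_info (raw_info : List String) (out : List (List String)) : Prop := out = process_gh_info_alt raw_info
instance (raw_info : List String) (out : List (List String)) : Decidable (Spec_process_gh_info raw_info out) := by unfold Spec_process_gh_info; infer_instance

-- ===== CLAIM (what is proved, stated in full; the proofs are below) =====
def Claim_equal_process_gh_info : Prop := ∀ (raw_info : List String), Dom_process_gh_info raw_info → Spec_process_gh_info raw_info (process_gh_info raw_info)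

-- ===== LEMMAS AND PROOFS =====

-- range(0, n, 3) as a mapped List.range (valid for every n ≥ 0, including n = 0)
lemma pyRange_step3 (n : Nat) :
    PySem.List.pyRange 0 (n : Int) 3 =
      (List.range ((n + 2) / 3)).map (fun k => ((3 * k : Nat) : Int)) := by
  rw [PySem.List.pyRange_of_pos 0 (n : Int) (by norm_num)]
  rcases Nat.eq_zero_or_pos n with h | h
  · subst h; simp
  · have h0 : (0 : Int) < (n : Int) := by exact_mod_cast h
    rw [if_pos h0]
    have : ((n : Int) - 0 + 3 - 1) / 3 = ((n + 2 : Nat) : Int) / ((3 : Nat) : Int) := by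
      push_cast; ring_nf
    rw [this, ← Int.natCast_div, Int.toNat_natCast]
    apply List.map_congr_left
    intro k _
    push_cast; ring

lemma pyRange_step3_succ (n : Nat) :
    PySem.List.pyRange 0 ((n : Int) + 3) 3 =
      0 :: (PySem.List.pyRange 0 (n : Int) 3).map (· + 3) := by
  have h3 : ((n : Int) + 3) = ((n + 3 : Nat) : Int) := by push_cast; ring
  rw [h3, pyRange_step3, pyRange_step3]
  have hm : (n + 3 + 2) / 3 = (n + 2) / 3 + 1 := by omega
  rw [hm, List.range_succ_eq_map, List.map_cons, List.map_map, List.map_map]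
  refine congrArg₂ _ (by norm_num) ?_
  apply List.map_congr_left
  intro k _
  simp only [Function.comp]
  push_cast; ring

-- shifting the index past three cons cells
lemma pyGetD_cons3 (a b c : String) (rest : List String) (i : Int) (h : 0 ≤ i) (d : String) :
    PySem.List.pyGetD (a :: b :: c :: rest) (i + 3) d = PySem.List.pyGetD rest i d := by
  rw [PySem.List.pyGetD_of_nonneg _ _ (by omega), PySem.List.pyGetD_of_nonneg _ _ h]
  have : (i + 3).toNat = i.toNat + 3 := by omega
  rw [this]
  rfl

lemma fold_eq (xs : List String) : ∀ acc : List (List String),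
    (PySem.List.pyRange 0 (xs.length : Int) 3).foldl
      (fun info i =>
        info ++ [[PySem.List.pyGetD xs i "",
                  PySem.List.pyGetD xs (i + 1) "",
                  PySem.List.pyGetD xs (i + 2) ""]]) acc
      = acc ++ process_gh_info_alt xs := by
  induction xs using process_gh_info_alt.induct with
  | case1 => intro acc; simp [process_gh_info_alt, PySem.List.pyRange]
  | case2 a => intro acc
               simp [process_gh_info_alt]
               rfl
  | case3 a b => intro acc
                 simp [process_gh_info_alt]
                 rfl
  | case4 a b c rest ih =>
    intro acc
    have hlen : (((a :: b :: c :: rest).length : Nat) : Int) = (rest.length : Int) + 3 := by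
      simp; ring
    rw [hlen, pyRange_step3_succ, List.foldl_cons, List.foldl_map]
    have g0 : PySem.List.pyGetD (a :: b :: c :: rest) 0 "" = a := by
      rw [PySem.List.pyGetD_of_nonneg _ _ (by norm_num)]; rfl
    have g1 : PySem.List.pyGetD (a :: b :: c :: rest) (0 + 1) "" = b := by
      rw [PySem.List.pyGetD_of_nonneg _ _ (by norm_num)]; rfl
    have g2 : PySem.List.pyGetD (a :: b :: c :: rest) (0 + 2) "" = c := by
      rw [PySem.List.pyGetD_of_nonneg _ _ (by norm_num)]; rfl
    simp only [g0, g1, g2]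
    rw [PySem.List.foldl_congr_mem _ _
      (fun info i =>
        info ++ [[PySem.List.pyGetD rest i "",
                  PySem.List.pyGetD rest (i + 1) "",
                  PySem.List.pyGetD rest (i + 2) ""]]) _ ?_]
    · rw [ih]
      simp [process_gh_info_alt]
    · intro acc' x hx
      have hx0 : 0 ≤ x := by
        rcases (PySem.List.mem_pyRange_iff_of_pos (by norm_num) x).mp hx with ⟨h1, _⟩
        exact h1
      have e1 : x + 3 + 1 = (x + 1) + 3 := by ring
      have e2 : x + 3 + 2 = (x + 2) + 3 := by ring
      rw [e1, e2, pyGetD_cons3 _ _ _ _ _ hx0, pyGetD_cons3 _ _ _ _ _ (by omega),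
          pyGetD_cons3 _ _ _ _ _ (by omega)]

-- ===== VERDICT (by name: the statement is the Claim_ definition above) =====
theorem process_gh_info_spec : Claim_equal_process_gh_info := by
  intro xs _
  show process_gh_info xs = process_gh_info_alt xs
  have h := fold_eq xs []
  simpa [process_gh_info] using h
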